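-- pv_equiv track=rewrite | github.com/yayekit/protinter | features.py | compute_conjoint_triad
-- ===== SOURCE A (Python) =====
-- from typing import Dict, List
--
-- def compute_conjoint_triad(sequence: str) -> List[int]:
--     """Compute Conjoint Triad features."""
--     groups = {'A': 0, 'G': 0, 'V': 0,
--               'I': 1, 'L': 1, 'F': 1, 'P': 1,
--               'Y': 2, 'M': 2, 'T': 2, 'S': 2,
--               'H': 3, 'N': 3, 'Q': 3, 'W': 3,
--               'R': 4, 'K': 4,
--               'D': 5, 'E': 5,
--               'C': 6}
--     features = [0] * 343  # 7^3 possible triads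
--
--     for i in range(len(sequence) - 2):
--         triad = (groups[sequence[i]], groups[sequence[i+1]], groups[sequence[i+2]])
--         features[triad[0]*49 + triad[1]*7 + triad[2]] += 1
--
--     return features
-- ===== SOURCE B (Python) =====
-- def compute_conjoint_triad(sequence):
--     """Compute Conjoint Triad features (sliding-window incremental index)."""
--     groups = {'A': 0, 'G': 0, 'V': 0,
--               'I': 1, 'L': 1, 'F': 1, 'P': 1,
--               'Y': 2, 'M': 2, 'T': 2, 'S': 2,
--               'H': 3, 'N': 3, 'Q': 3, 'W': 3,
--               'R': 4, 'K': 4,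
--               'D': 5, 'E': 5,
--               'C': 6}
--     features = [0] * 343
--     if len(sequence) < 3:
--         return features
--     idx = groups[sequence[0]] * 49 + groups[sequence[1]] * 7 + groups[sequence[2]]
--     features[idx] += 1
--     for ch in sequence[3:]:
--         idx = (idx % 49) * 7 + groups[ch]
--         features[idx] += 1
--     return features
-- ===== Notes on version B (the rewrite author's own statement) =====
-- stated objective: alternative
-- what changed: Replaces the index-based loop that looks up all three window characters per triad with a guarded sliding-window scan that looks up each character once and updates the triad index incrementally via idx = (idx % 49)*7 + code.
import Mathlib
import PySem

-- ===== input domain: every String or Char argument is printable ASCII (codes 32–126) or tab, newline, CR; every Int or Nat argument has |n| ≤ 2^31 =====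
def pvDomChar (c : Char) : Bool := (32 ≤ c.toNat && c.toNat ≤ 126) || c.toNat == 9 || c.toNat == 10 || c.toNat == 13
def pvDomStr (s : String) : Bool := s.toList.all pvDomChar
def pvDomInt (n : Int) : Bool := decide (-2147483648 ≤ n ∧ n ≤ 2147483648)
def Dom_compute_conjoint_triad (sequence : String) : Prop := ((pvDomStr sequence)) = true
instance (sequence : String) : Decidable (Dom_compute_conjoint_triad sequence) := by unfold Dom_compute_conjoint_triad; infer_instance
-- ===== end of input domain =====

-- B replaces the three-lookups-per-window index loop of A by a guarded sliding-window
-- scan with an incrementally updated triad index (one group lookup per character).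


-- ===== PORT A =====
-- the dict literal `groups` (Python single-char string keys ported as Char)
def ctGroups : PySem.Dict Char Int :=
  PySem.Dict.ofList [('A',0),('G',0),('V',0),
                     ('I',1),('L',1),('F',1),('P',1),
                     ('Y',2),('M',2),('T',2),('S',2),
                     ('H',3),('N',3),('Q',3),('W',3),
                     ('R',4),('K',4),
                     ('D',5),('E',5),
                     ('C',6)]

-- `groups[c]` (total form of the KeyError-raising lookup; exact under Pre_)
def ctG (c : Char) : Int := ctGroups.getD c 0

-- `triad = (groups[s[i]], groups[s[i+1]], groups[s[i+2]])` flattened into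
-- `triad[0]*49 + triad[1]*7 + triad[2]`
def ctTri (cs : List Char) (i : Int) : Int :=
  ctG (PySem.List.pyGetD cs i ' ') * 49 +
  ctG (PySem.List.pyGetD cs (i + 1) ' ') * 7 +
  ctG (PySem.List.pyGetD cs (i + 2) ' ')

-- `features[idx] += 1` (in-range under the loop's index arithmetic)
def ctBump (features : List Int) (idx : Int) : List Int :=
  PySem.List.pySetD features idx (PySem.List.pyGetD features idx 0 + 1)

def compute_conjoint_triad (sequence : String) : List Int :=
  let cs := sequence.toList
  let features := List.replicate 343 (0 : Int)
  (PySem.List.pyRange 0 ((cs.length : Int) - 2) 1).foldl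
    (fun features i => ctBump features (ctTri cs i))
    features

-- ===== PORT B =====
def compute_conjoint_triad_alt (sequence : String) : List Int :=
  let features := List.replicate 343 (0 : Int)
  match sequence.toList with
  | c0 :: c1 :: c2 :: rest =>
      -- initial window, then slide: idx = (idx % 49)*7 + code
      let idx := ctG c0 * 49 + ctG c1 * 7 + ctG c2
      let features := ctBump features idx
      (rest.foldl
        (fun (st : List Int × Int) ch =>
          let idx := PySem.Int.mod st.2 49 * 7 + ctG ch
          (ctBump st.1 idx, idx))
        (features, idx)).1
  | _ => features  -- len(sequence) < 3

-- ===== PRECONDITION & SPEC =====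
-- Pre_ excludes exactly the inputs where Python A raises KeyError: length ≥ 3 with a
-- character outside the 20-letter amino-acid alphabet (every character is looked up then).
def Pre_compute_conjoint_triad (sequence : String) : Prop :=
  sequence.toList.length < 3 ∨ sequence.toList.all (fun c => ctGroups.contains c) = true
instance (sequence : String) : Decidable (Pre_compute_conjoint_triad sequence) := by
  unfold Pre_compute_conjoint_triad; infer_instance
def pvWitness_compute_conjoint_triad : String := "AGVMC"

def Spec_compute_conjoint_triad (sequence : String) (out : List Int) : Prop := out = compute_conjoint_triad_alt sequence
instance (sequence : String) (out : List Int) : Decidable (Spec_compute_conjoint_triad sequence out) := by unfold Spec_compute_conjoint_triad; infer_instance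

-- ===== CLAIM (what is proved, stated in full; the proofs are below) =====
def Claim_equal_compute_conjoint_triad : Prop := ∀ (sequence : String), Dom_compute_conjoint_triad sequence → Pre_compute_conjoint_triad sequence → Spec_compute_conjoint_triad sequence (compute_conjoint_triad sequence)

-- ===== LEMMAS AND PROOFS =====

-- every group code lies in [0, 7)
theorem ctG_bounds (c : Char) : 0 ≤ ctG c ∧ ctG c < 7 := by
  unfold ctG
  rcases h : ctGroups.get? c with _ | v
  · rw [PySem.Dict.getD_of_get?_eq_none _ _ h]; omega
  · rw [PySem.Dict.getD_of_get?_eq_some _ _ h]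
    have hv : v ∈ ctGroups.values := by
      have hm := PySem.Dict.mem_items_of_get?_eq_some _ h
      simp only [PySem.Dict.values, List.mem_map]
      exact ⟨(c, v), hm, rfl⟩
    have hvals : ctGroups.values = [0,0,0,1,1,1,1,2,2,2,2,3,3,3,3,4,4,5,5,6] := by decide
    rw [hvals] at hv
    simp only [List.mem_cons, List.not_mem_nil, or_false] at hv
    rcases hv with h|h|h|h|h|h|h|h|h|h|h|h|h|h|h|h|h|h|h|h <;> omega

-- shifting a window index past a leading character
theorem ctGetD_cons_succ (a : Char) (cs : List Char) (m : Int) (hm : 0 ≤ m) :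
    PySem.List.pyGetD (a :: cs) (m + 1) ' ' = PySem.List.pyGetD cs m ' ' := by
  rw [PySem.List.pyGetD_of_nonneg _ _ (by omega), PySem.List.pyGetD_of_nonneg _ _ hm]
  have h1 : (m + 1).toNat = m.toNat + 1 := by omega
  simp [h1]

theorem ctTri_cons_succ (a : Char) (cs : List Char) (m : Int) (hm : 0 ≤ m) :
    ctTri (a :: cs) (m + 1) = ctTri cs m := by
  unfold ctTri
  rw [show m + 1 + 1 = (m + 1) + 1 from rfl, show m + 1 + 2 = (m + 2) + 1 from by ring,
      ctGetD_cons_succ a cs m hm, ctGetD_cons_succ a cs (m + 1) (by omega),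
      ctGetD_cons_succ a cs (m + 2) (by omega)]

-- the list of triad indices of a sequence, window by window
def ctTriads : List Char → List Int
  | a :: b :: c :: t => (ctG a * 49 + ctG b * 7 + ctG c) :: ctTriads (b :: c :: t)
  | _ => []

-- A's indexed loop enumerates exactly ctTriads
theorem ctTriads_eq_map : ∀ (cs : List Char),
    (List.range (cs.length - 2)).map (fun (k : Nat) => ctTri cs (k : Int)) = ctTriads cs
  | [] => by simp [ctTriads]
  | [a] => by simp [ctTriads]
  | [a, b] => by simp [ctTriads]
  | a :: b :: c :: t => by
    have hlen : (a :: b :: c :: t).length - 2 = t.length + 1 := by simp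
    rw [hlen, List.range_succ_eq_map, List.map_cons, List.map_map]
    show _ :: _ = ctTriads (a :: b :: c :: t)
    rw [ctTriads]
    congr 1
    · simp [ctTri, PySem.List.pyGetD_of_nonneg, List.getD]
    · have ih := ctTriads_eq_map (b :: c :: t)
      have hlen2 : (b :: c :: t).length - 2 = t.length := by simp
      rw [hlen2] at ih
      rw [← ih]
      apply List.map_congr_left
      intro k _
      have h1 : ((k + 1 : Nat) : Int) = (k : Int) + 1 := by push_cast; ring
      simp only [Function.comp_apply, Nat.succ_eq_add_one, h1]
      exact ctTri_cons_succ a (b :: c :: t) (k : Int) (by positivity)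

-- B's sliding loop folds ctBump over the remaining windows
theorem ctLoop (rest : List Char) : ∀ (b c : Char) (feat : List Int) (idx : Int),
    PySem.Int.mod idx 49 = ctG b * 7 + ctG c →
    (rest.foldl
      (fun (st : List Int × Int) ch =>
        let i := PySem.Int.mod st.2 49 * 7 + ctG ch
        (ctBump st.1 i, i))
      (feat, idx)).1 = (ctTriads (b :: c :: rest)).foldl ctBump feat := by
  induction rest with
  | nil => intro b c feat idx _; simp [ctTriads]
  | cons r t ih =>
    intro b c feat idx hinv
    simp only [List.foldl_cons, ctTriads, hinv]
    have hb := ctG_bounds b; have hc := ctG_bounds c; have hr := ctG_bounds r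
    have hidx : (ctG b * 7 + ctG c) * 7 + ctG r = ctG b * 49 + ctG c * 7 + ctG r := by ring
    rw [hidx]
    exact ih c r (ctBump feat (ctG b * 49 + ctG c * 7 + ctG r)) _
      (by rw [PySem.Int.mod_eq_emod_of_pos (by omega : (0:Int) < 49)]; omega)

-- A's whole loop in terms of ctTriads
theorem ctA_eq_triads (cs : List Char) :
    (PySem.List.pyRange 0 ((cs.length : Int) - 2) 1).foldl
      (fun features i => ctBump features (ctTri cs i)) (List.replicate 343 (0 : Int)) =
    (ctTriads cs).foldl ctBump (List.replicate 343 (0 : Int)) := by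
  rw [PySem.List.pyRange_one, ← List.foldl_map, List.map_map]
  have hn : (((cs.length : Int) - 2) - 0).toNat = cs.length - 2 := by omega
  rw [hn, ← ctTriads_eq_map cs]
  congr 1
  apply List.map_congr_left
  intro k _
  simp

-- ===== VERDICT (by name: the statement is the Claim_ definition above) =====
theorem compute_conjoint_triad_spec : Claim_equal_compute_conjoint_triad := by
  intro sequence _ _
  show compute_conjoint_triad sequence = compute_conjoint_triad_alt sequence
  unfold compute_conjoint_triad compute_conjoint_triad_alt
  rw [ctA_eq_triads sequence.toList]
  generalize sequence.toList = cs
  match cs with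
  | [] => rfl
  | [a] => rfl
  | [a, b] => rfl
  | c0 :: c1 :: c2 :: rest =>
    simp only [ctTriads, List.foldl_cons]
    rw [ctLoop rest c1 c2 _ _ ?_]
    have h1 := ctG_bounds c0; have h2 := ctG_bounds c1; have h3 := ctG_bounds c2
    rw [PySem.Int.mod_eq_emod_of_pos (by omega : (0:Int) < 49)]
    omega
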